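-- pv_equiv track=rewrite | github.com/logsdail/carmm | venv/lib/python3.7/site-packages/ase/io/cif_unicode.py | replace_subscript
-- ===== SOURCE A (Python) =====
-- superscript_dict = {
--     '0': u'\u2070',  # superscript 0
--     '1': u'\u00b9',  # superscript 1
--     '2': u'\u00b2',  # superscript 2
--     '3': u'\u00b3',  # superscript 3
--     '4': u'\u2074',  # superscript 4
--     '5': u'\u2075',  # superscript 5
--     '6': u'\u2076',  # superscript 6
--     '7': u'\u2077',  # superscript 7
--     '8': u'\u2078',  # superscript 8
--     '9': u'\u2079',  # superscript 9
-- }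
--
-- subscript_dict = {
--     '0': u'\u2080',  # subscript 0
--     '1': u'\u2081',  # subscript 1
--     '2': u'\u2082',  # subscript 2
--     '3': u'\u2083',  # subscript 3
--     '4': u'\u2084',  # subscript 4
--     '5': u'\u2085',  # subscript 5
--     '6': u'\u2086',  # subscript 6
--     '7': u'\u2087',  # subscript 7
--     '8': u'\u2088',  # subscript 8
--     '9': u'\u2089',  # subscript 9
-- }
--
-- def replace_subscript(s, subscript=True):
--
--     target = '~'
--     rdict = subscript_dict
--     if not subscript:
--         target = '^'
--         rdict = superscript_dict
--
--     replaced = []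
--     inside = False
--     for char in s:
--         if char == target:
--             inside = not inside
--         elif not inside:
--             replaced += [char]
--         # note: do not use char.isdigit - this also matches (sub/super)scripts
--         elif char in rdict:
--             replaced += [rdict[char]]
--         else:
--             replaced += [char]
--
--     return ''.join(replaced)
-- ===== SOURCE B (Python) =====
-- _SUB_TABLE = str.maketrans('0123456789', '\u2080\u2081\u2082\u2083\u2084\u2085\u2086\u2087\u2088\u2089')
-- _SUP_TABLE = str.maketrans('0123456789', '\u2070\u00b9\u00b2\u00b3\u2074\u2075\u2076\u2077\u2078\u2079')
--
-- def replace_subscript(s, subscript=True):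
--     target, table = ('~', _SUB_TABLE) if subscript else ('^', _SUP_TABLE)
--     parts = s.split(target)
--     return ''.join(p if i % 2 == 0 else p.translate(table)
--                    for i, p in enumerate(parts))
-- ===== Notes on version B (the rewrite author's own statement) =====
-- stated objective: simpler
-- what changed: Replaces the per-character toggling state machine with split-on-the-marker plus a translation table: split the string on the sub/superscript marker character and translate digits only in the odd-indexed (inside-marker) parts, joining the result.
import Mathlib
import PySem

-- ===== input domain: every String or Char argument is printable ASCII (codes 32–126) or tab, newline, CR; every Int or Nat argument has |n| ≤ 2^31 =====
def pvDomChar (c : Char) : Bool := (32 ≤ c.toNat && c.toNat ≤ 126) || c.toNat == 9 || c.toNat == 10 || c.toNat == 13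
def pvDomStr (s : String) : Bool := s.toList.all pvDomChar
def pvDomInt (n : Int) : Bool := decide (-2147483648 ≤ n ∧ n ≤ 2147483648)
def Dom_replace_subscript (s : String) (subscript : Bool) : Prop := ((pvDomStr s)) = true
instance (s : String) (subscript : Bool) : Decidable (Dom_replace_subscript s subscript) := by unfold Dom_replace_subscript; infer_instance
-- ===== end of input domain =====

-- B replaces A's toggling state machine by split-on-marker + translate the odd-indexed parts (objective: simpler).

-- ===== PORT A =====
def superscriptDict : PySem.Dict Char Char := PySem.Dict.mk
  [('0','⁰'),('1','¹'),('2','²'),('3','³'),('4','⁴'),('5','⁵'),('6','⁶'),('7','⁷'),('8','⁸'),('9','⁹')]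

def subscriptDict : PySem.Dict Char Char := PySem.Dict.mk
  [('0','₀'),('1','₁'),('2','₂'),('3','₃'),('4','₄'),('5','₅'),('6','₆'),('7','₇'),('8','₈'),('9','₉')]

-- Python appends one-character strings to `replaced` and joins; the port accumulates the chars directly.
-- `rdict[char]` is guarded by `char in rdict`, so `(get? c).getD c` is exactly Python's lookup there.
def replace_subscript (s : String) (subscript : Bool) : String :=
  let target : Char := if !subscript then '^' else '~'
  let rdict : PySem.Dict Char Char := if !subscript then superscriptDict else subscriptDict
  let res := s.toList.foldl (fun (st : List Char × Bool) c =>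
    if c == target then (st.1, !st.2)
    else if !st.2 then (st.1 ++ [c], st.2)
    else if rdict.contains c then (st.1 ++ [(rdict.get? c).getD c], st.2)
    else (st.1 ++ [c], st.2)) ([], false)
  String.mk res.1

-- ===== PORT B =====
-- str.maketrans('0123456789', …) ported as the corresponding association table
def subTable : List (Char × Char) :=
  [('0','₀'),('1','₁'),('2','₂'),('3','₃'),('4','₄'),('5','₅'),('6','₆'),('7','₇'),('8','₈'),('9','₉')]

def supTable : List (Char × Char) :=
  [('0','⁰'),('1','¹'),('2','²'),('3','³'),('4','⁴'),('5','⁵'),('6','⁶'),('7','⁷'),('8','⁸'),('9','⁹')]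

-- str.translate on one char: first matching table entry, else the char itself (exact for these tables)
def pvTranslate (tbl : List (Char × Char)) (c : Char) : Char :=
  ((tbl.find? (fun p => p.1 == c)).map Prod.snd).getD c

-- hand port of s.split(sep) for a ONE-CHARACTER separator; exact: CPython gives ''.split(sep) == ['']
-- and one part more than the number of separators, in order
def pvSplit1 (sep : Char) : List Char → List (List Char)
  | [] => [[]]
  | c :: rest =>
    match pvSplit1 sep rest with
    | [] => [[]]
    | p :: ps => if c == sep then [] :: p :: ps else (c :: p) :: ps

def replace_subscript_alt (s : String) (subscript : Bool) : String :=
  let tp : Char × List (Char × Char) := if subscript then ('~', subTable) else ('^', supTable)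
  let parts := pvSplit1 tp.1 s.toList
  String.mk ((parts.zipIdx.map
    (fun pi => if pi.2 % 2 == 0 then pi.1 else pi.1.map (pvTranslate tp.2))).flatten)

-- ===== PRECONDITION & SPEC =====
def Spec_replace_subscript (s : String) (subscript : Bool) (out : String) : Prop := out = replace_subscript_alt s subscript
instance (s : String) (subscript : Bool) (out : String) : Decidable (Spec_replace_subscript s subscript out) := by unfold Spec_replace_subscript; infer_instance

-- ===== CLAIM (what is proved, stated in full; the proofs are below) =====
def Claim_equal_replace_subscript : Prop := ∀ (s : String) (subscript : Bool), Dom_replace_subscript s subscript → Spec_replace_subscript s subscript (replace_subscript s subscript)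

-- ===== LEMMAS AND PROOFS =====

-- A's per-character replacement (dict lookup guarded by membership) equals B's translate, pointwise
theorem trSub_eq (c : Char) :
    (if subscriptDict.contains c then (subscriptDict.get? c).getD c else c) = pvTranslate subTable c := by
  by_cases h0 : '0' = c; · subst h0; decide
  by_cases h1 : '1' = c; · subst h1; decide
  by_cases h2 : '2' = c; · subst h2; decide
  by_cases h3 : '3' = c; · subst h3; decide
  by_cases h4 : '4' = c; · subst h4; decide
  by_cases h5 : '5' = c; · subst h5; decide
  by_cases h6 : '6' = c; · subst h6; decide
  by_cases h7 : '7' = c; · subst h7; decide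
  by_cases h8 : '8' = c; · subst h8; decide
  by_cases h9 : '9' = c; · subst h9; decide
  simp_all [subscriptDict, subTable, pvTranslate, PySem.Dict.contains_mk, List.find?,
    beq_eq_false_iff_ne.mpr h0, beq_eq_false_iff_ne.mpr h1, beq_eq_false_iff_ne.mpr h2,
    beq_eq_false_iff_ne.mpr h3, beq_eq_false_iff_ne.mpr h4, beq_eq_false_iff_ne.mpr h5,
    beq_eq_false_iff_ne.mpr h6, beq_eq_false_iff_ne.mpr h7, beq_eq_false_iff_ne.mpr h8,
    beq_eq_false_iff_ne.mpr h9]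

theorem trSup_eq (c : Char) :
    (if superscriptDict.contains c then (superscriptDict.get? c).getD c else c) = pvTranslate supTable c := by
  by_cases h0 : '0' = c; · subst h0; decide
  by_cases h1 : '1' = c; · subst h1; decide
  by_cases h2 : '2' = c; · subst h2; decide
  by_cases h3 : '3' = c; · subst h3; decide
  by_cases h4 : '4' = c; · subst h4; decide
  by_cases h5 : '5' = c; · subst h5; decide
  by_cases h6 : '6' = c; · subst h6; decide
  by_cases h7 : '7' = c; · subst h7; decide
  by_cases h8 : '8' = c; · subst h8; decide
  by_cases h9 : '9' = c; · subst h9; decide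
  simp_all [superscriptDict, supTable, pvTranslate, PySem.Dict.contains_mk, List.find?,
    beq_eq_false_iff_ne.mpr h0, beq_eq_false_iff_ne.mpr h1, beq_eq_false_iff_ne.mpr h2,
    beq_eq_false_iff_ne.mpr h3, beq_eq_false_iff_ne.mpr h4, beq_eq_false_iff_ne.mpr h5,
    beq_eq_false_iff_ne.mpr h6, beq_eq_false_iff_ne.mpr h7, beq_eq_false_iff_ne.mpr h8,
    beq_eq_false_iff_ne.mpr h9]

-- proof-side rendering of the split parts: translate the parts the flag is on for, toggling
def renderP (tr : Char → Char) : Bool → List (List Char) → List Char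
  | _, [] => []
  | ins, p :: ps => (if ins then p.map tr else p) ++ renderP tr (!ins) ps

theorem renderP_congr (f g : Char → Char) (h : ∀ c, f c = g c) :
    ∀ (b : Bool) (ps : List (List Char)), renderP f b ps = renderP g b ps := by
  intro b ps
  induction ps generalizing b with
  | nil => rfl
  | cons p ps ih =>
    simp only [renderP, ih]
    cases b <;> simp [List.map_congr_left (fun c _ => h c)]

theorem pvSplit1_ne_nil (sep : Char) (l : List Char) : pvSplit1 sep l ≠ [] := by
  induction l with
  | nil => simp [pvSplit1]
  | cons c rest ih =>
    simp only [pvSplit1]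
    split
    · simp
    · split <;> simp

-- B's enumerate-parity rendering equals renderP, for any starting index
theorem zipIdx_render (tr : Char → Char) (parts : List (List Char)) : ∀ (n : Nat),
    ((parts.zipIdx n).map (fun pi => if pi.2 % 2 == 0 then pi.1 else pi.1.map tr)).flatten
      = renderP tr (n % 2 == 1) parts := by
  induction parts with
  | nil => intro n; simp [renderP]
  | cons p ps ih =>
    intro n
    rw [List.zipIdx_cons]
    simp only [List.map_cons, List.flatten_cons, ih (n + 1), renderP]
    rcases Nat.mod_two_eq_zero_or_one n with h | h <;>
      simp [h, Nat.add_mod, Nat.mod_self]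

-- A's toggling fold over the characters equals renderP over the split parts
theorem loopA (target : Char) (rdict : PySem.Dict Char Char) (l : List Char) :
    ∀ (acc : List Char) (ins : Bool),
    (l.foldl (fun (st : List Char × Bool) c =>
        if c == target then (st.1, !st.2)
        else if !st.2 then (st.1 ++ [c], st.2)
        else if rdict.contains c then (st.1 ++ [(rdict.get? c).getD c], st.2)
        else (st.1 ++ [c], st.2)) (acc, ins)).1
      = acc ++ renderP (fun c => if rdict.contains c then (rdict.get? c).getD c else c) ins (pvSplit1 target l) := by
  induction l with
  | nil => intro acc ins; simp [pvSplit1, renderP]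
  | cons c rest ih =>
    intro acc ins
    obtain ⟨p, ps, h⟩ : ∃ p ps, pvSplit1 target rest = p :: ps := by
      cases hs : pvSplit1 target rest with
      | nil => exact absurd hs (pvSplit1_ne_nil target rest)
      | cons p ps => exact ⟨p, ps, rfl⟩
    rw [List.foldl_cons]
    by_cases hc : (c == target) = true
    · simp only [hc, if_true]
      rw [ih]
      simp only [pvSplit1, h, hc, if_true, renderP]
      cases ins <;> simp
    · have hcf : (c == target) = false := by revert hc; cases (c == target) <;> simp
      simp only [hcf, Bool.false_eq_true, if_false]
      cases ins with
      | false =>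
        simp only [Bool.not_false, if_true]
        rw [ih, h]
        simp only [pvSplit1, h, hcf, Bool.false_eq_true, if_false, renderP]
        simp
      | true =>
        simp only [Bool.not_true, Bool.false_eq_true, if_false]
        by_cases hm : rdict.contains c = true <;>
          simp only [hm, Bool.false_eq_true, if_true, if_false] <;>
          · rw [ih, h]
            simp only [pvSplit1, h, hcf, Bool.false_eq_true, if_false, renderP, hm,
              if_true, List.map_cons]
            simp

-- ===== VERDICT (by name: the statement is the Claim_ definition above) =====
theorem replace_subscript_spec : Claim_equal_replace_subscript := by
  intro s subscript _
  unfold Spec_replace_subscript replace_subscript replace_subscript_alt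
  cases subscript <;>
    simp only [Bool.not_false, Bool.not_true, if_true, if_false, Bool.false_eq_true] <;>
    rw [loopA, zipIdx_render] <;>
    simp only [List.nil_append, Nat.zero_mod, show ((0:Nat) == 1) = false from rfl] <;>
    congr 1
  · exact renderP_congr _ _ trSup_eq false _
  · exact renderP_congr _ _ trSub_eq false _
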